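-- pv_equiv track=rewrite | github.com/SoftSec-KAIST/Reassessor | reassessor/lib/asmfile.py | parse_att_operands
-- ===== SOURCE A (Python) =====
-- def parse_att_operands(operand_str):
--     token = ''
--     lpar = False
--     operand_list = []
--     for char in operand_str:
--         if lpar:
--             token += char
--             if char == ')':
--                 lpar = False
--             continue
--         if char == ',':
--             operand_list.append(token)
--             token = ''
--             continue
--         if char == ' ':
--             continue
--
--         token += char
--         if char == '(':
--             lpar = True
--     if token:
--         operand_list.append(token)
--
--     return operand_list
-- ===== SOURCE B (Python) =====
-- def parse_att_operands(operand_str):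
--     # Pass 1: split into raw segments on commas seen outside parens.
--     segs = [[]]
--     inside = False
--     for ch in operand_str:
--         if not inside and ch == ',':
--             segs.append([])
--         else:
--             segs[-1].append(ch)
--             if inside:
--                 if ch == ')':
--                     inside = False
--             elif ch == '(':
--                 inside = True
--     # Pass 2: clean each segment by dropping spaces that lie outside parens.
--     def clean(seg):
--         out = []
--         inside = False
--         for ch in seg:
--             if inside:
--                 out.append(ch)
--                 if ch == ')':
--                     inside = False
--             elif ch != ' ':
--                 out.append(ch)
--                 if ch == '(':
--                     inside = True
--         return ''.join(out)
--     toks = [clean(s) for s in segs]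
--     if toks[-1] == '':
--         toks.pop()
--     return toks
-- ===== Notes on version B (the rewrite author's own statement) =====
-- stated objective: alternative
-- what changed: Replaces A's single interleaved loop (space-skipping, comma-cutting and paren tracking at once) by a two-pass split-then-clean decomposition: first a paren-aware split on commas into raw segments, then per-segment removal of spaces outside parens, dropping the final token iff it cleans to empty.
import Mathlib
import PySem

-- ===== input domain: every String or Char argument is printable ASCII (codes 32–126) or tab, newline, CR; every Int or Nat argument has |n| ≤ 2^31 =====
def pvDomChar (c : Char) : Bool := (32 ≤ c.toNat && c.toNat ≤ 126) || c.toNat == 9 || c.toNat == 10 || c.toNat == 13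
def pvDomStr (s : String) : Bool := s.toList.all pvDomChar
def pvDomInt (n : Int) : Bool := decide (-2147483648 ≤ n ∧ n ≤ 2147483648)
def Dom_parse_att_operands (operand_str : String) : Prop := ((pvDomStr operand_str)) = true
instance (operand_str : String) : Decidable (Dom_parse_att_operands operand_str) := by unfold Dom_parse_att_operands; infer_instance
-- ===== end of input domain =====

-- B replaces A's single interleaved loop by a two-pass decomposition (paren-aware comma split,
-- then per-segment space cleaning); objective: alternative decomposition, same cost.

-- ===== PORT A =====
-- A's loop, step for step: state = (token, lpar, operand_list); trailing nonempty token appended.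
def pvALoop : List Char → List Char → Bool → List (List Char) → List (List Char)
  | [], tok, _, ops => if tok ≠ [] then ops ++ [tok] else ops
  | c :: cs, tok, lpar, ops =>
    if lpar then
      pvALoop cs (tok ++ [c]) (if c = ')' then false else true) ops
    else if c = ',' then
      pvALoop cs [] false (ops ++ [tok])
    else if c = ' ' then
      pvALoop cs tok false ops
    else
      pvALoop cs (tok ++ [c]) (if c = '(' then true else false) ops

def parse_att_operands (operand_str : String) : List String :=
  (pvALoop operand_str.toList [] false []).map String.ofList

-- ===== PORT B =====
-- Pass 1 of Source B: split on commas outside parens; returns (first segment, remaining segments).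
def pvSplitSegs : List Char → Bool → List Char × List (List Char)
  | [], _ => ([], [])
  | c :: cs, true =>
    let r := pvSplitSegs cs (if c = ')' then false else true)
    (c :: r.1, r.2)
  | c :: cs, false =>
    if c = ',' then
      let r := pvSplitSegs cs false
      ([], r.1 :: r.2)
    else
      let r := pvSplitSegs cs (if c = '(' then true else false)
      (c :: r.1, r.2)

-- Pass 2 of Source B: remove spaces that lie outside parens.
def pvClean : List Char → Bool → List Char
  | [], _ => []
  | c :: cs, true => c :: pvClean cs (if c = ')' then false else true)
  | c :: cs, false =>
    if c = ' ' then pvClean cs false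
    else c :: pvClean cs (if c = '(' then true else false)

-- Source B's trailing pop: drop the last token iff it cleaned to empty.
def pvDropLastEmpty : List (List Char) → List (List Char)
  | [] => []
  | [x] => if x = [] then [] else [x]
  | x :: y :: l => x :: pvDropLastEmpty (y :: l)

def parse_att_operands_alt (operand_str : String) : List String :=
  let r := pvSplitSegs operand_str.toList false
  (pvDropLastEmpty (pvClean r.1 false :: r.2.map (fun seg => pvClean seg false))).map String.ofList

-- ===== PRECONDITION & SPEC =====
def Spec_parse_att_operands (operand_str : String) (out : List String) : Prop := out = parse_att_operands_alt operand_str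
instance (operand_str : String) (out : List String) : Decidable (Spec_parse_att_operands operand_str out) := by unfold Spec_parse_att_operands; infer_instance

-- ===== CLAIM (what is proved, stated in full; the proofs are below) =====
def Claim_equal_parse_att_operands : Prop := ∀ (operand_str : String), Dom_parse_att_operands operand_str → Spec_parse_att_operands operand_str (parse_att_operands operand_str)

-- ===== LEMMAS AND PROOFS =====

theorem pvMain (cs : List Char) : ∀ (flag : Bool) (tok : List Char) (ops : List (List Char)),
    pvALoop cs tok flag ops =
      ops ++ pvDropLastEmpty ((tok ++ pvClean (pvSplitSegs cs flag).1 flag) ::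
        (pvSplitSegs cs flag).2.map (fun seg => pvClean seg false)) := by
  induction cs with
  | nil =>
    intro flag tok ops
    simp only [pvALoop, pvSplitSegs, pvClean, List.map, List.append_nil, pvDropLastEmpty]
    by_cases h : tok = []
    · simp [h]
    · simp [h]
  | cons c cs ih =>
    intro flag tok ops
    cases flag with
    | true =>
      simp only [pvALoop, pvSplitSegs]
      rw [ih]
      simp [pvClean]
    | false =>
      by_cases hc : c = ','
      · subst hc
        have hA : pvALoop (',' :: cs) tok false ops = pvALoop cs [] false (ops ++ [tok]) := by
          simp [pvALoop]
        have hS : pvSplitSegs (',' :: cs) false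
            = ([], (pvSplitSegs cs false).1 :: (pvSplitSegs cs false).2) := by
          simp [pvSplitSegs]
        rw [hA, hS, ih]
        simp only [pvClean, List.append_nil, List.map, pvDropLastEmpty]
        simp
      · by_cases hs : c = ' '
        · subst hs
          have hA : pvALoop (' ' :: cs) tok false ops = pvALoop cs tok false ops := by
            simp [pvALoop, hc]
          have hS : pvSplitSegs (' ' :: cs) false
              = (' ' :: (pvSplitSegs cs false).1, (pvSplitSegs cs false).2) := by
            simp [pvSplitSegs, hc]
          rw [hA, hS, ih]
          simp [pvClean]
        · have hA : pvALoop (c :: cs) tok false ops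
              = pvALoop cs (tok ++ [c]) (if c = '(' then true else false) ops := by
            simp [pvALoop, hc, hs]
          have hS : pvSplitSegs (c :: cs) false
              = (c :: (pvSplitSegs cs (if c = '(' then true else false)).1,
                 (pvSplitSegs cs (if c = '(' then true else false)).2) := by
            simp [pvSplitSegs, hc]
          rw [hA, hS, ih]
          simp [pvClean, hs]

-- ===== VERDICT (by name: the statement is the Claim_ definition above) =====
theorem parse_att_operands_spec : Claim_equal_parse_att_operands := by
  intro s _
  unfold Spec_parse_att_operands parse_att_operands parse_att_operands_alt
  rw [pvMain]
  simp
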